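-- pv_equiv track=rewrite | github.com/Hk4Fun/algorithm_offer | leetcode/array/easy/665. Non-decreasing Array.py | checkPossibility1
-- ===== SOURCE A (Python) =====
-- def checkPossibility1(A):
--     p = None
--     for i in range(len(A) - 1):
--         if A[i] > A[i + 1]:
--             if p is not None: return False
--             p = i
--     return (p is None or p == 0 or p == len(A) - 2 or
--             A[p - 1] <= A[p + 1] or A[p] <= A[p + 2])
-- ===== SOURCE B (Python) =====
-- def checkPossibility1(A):
--     # Greedy single-pass repair: thread an effective previous value; on the first
--     # descent either lower prev (keep x) or raise x to prev, depending on the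
--     # element two back; a second descent means impossible.
--     cnt = 0
--     pp = None
--     prev = None
--     for x in A:
--         if prev is not None and prev > x:
--             cnt += 1
--             if cnt > 1:
--                 return False
--             if pp is not None and pp > x:
--                 x = prev
--         pp, prev = prev, x
--     return True
-- ===== Notes on version B (the rewrite author's own statement) =====
-- stated objective: alternative
-- what changed: B replaces A's record-the-first-descent-index-then-test-a-final-index-formula scan with a greedy single-pass repair that threads an effective previous value (lower prev or raise the current element at the first descent) and fails on a second descent.
import Mathlib
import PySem

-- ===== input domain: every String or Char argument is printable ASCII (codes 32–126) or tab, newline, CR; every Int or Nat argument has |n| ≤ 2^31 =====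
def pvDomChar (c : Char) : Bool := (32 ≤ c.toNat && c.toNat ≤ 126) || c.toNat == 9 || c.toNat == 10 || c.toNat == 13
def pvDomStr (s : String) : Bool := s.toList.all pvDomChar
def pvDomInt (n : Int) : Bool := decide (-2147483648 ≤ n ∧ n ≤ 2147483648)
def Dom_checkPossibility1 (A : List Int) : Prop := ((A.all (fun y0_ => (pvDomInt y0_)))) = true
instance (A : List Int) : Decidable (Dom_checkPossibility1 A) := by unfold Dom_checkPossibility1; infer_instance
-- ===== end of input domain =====

-- B is a greedy single-pass repair (effective previous value, at most one fix) instead of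
-- A's record-first-descent-index scan with a final index-formula check; same O(n) cost.

-- ===== PORT A =====
-- loop state: none = early 'return False'; some p = current value of the variable p
-- (some none = p is None, some (some i) = p = i).
-- The index reads A[i], A[i+1], A[p-1], A[p+1], A[p], A[p+2] are all in range whenever
-- Python evaluates them (Python's `or` short-circuits exactly where the Bool `||` value
-- makes the later disjunct irrelevant), so `(pyGet? …).getD 0` is exact here.
def checkPossibility1 (A : List Int) : Bool :=
  let n : Int := A.length
  let r := (PySem.List.pyRange 0 (n - 1) 1).foldl
    (fun (st : Option (Option Int)) i =>
      match st with
      | none => none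
      | some p =>
        if (PySem.List.pyGet? A i).getD 0 > (PySem.List.pyGet? A (i + 1)).getD 0 then
          match p with
          | some _ => none
          | none => some (some i)
        else some p)
    (some none)
  match r with
  | none => false
  | some none => true
  | some (some p) =>
    decide (p = 0) || decide (p = n - 2) ||
      decide ((PySem.List.pyGet? A (p - 1)).getD 0 ≤ (PySem.List.pyGet? A (p + 1)).getD 0) ||
      decide ((PySem.List.pyGet? A p).getD 0 ≤ (PySem.List.pyGet? A (p + 2)).getD 0)

-- ===== PORT B =====
-- structural recursion over the list, state (pp, prev, cnt) exactly as in Source B's loop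
def pvAltGo (pp prev : Option Int) (cnt : Int) : List Int → Bool
  | [] => true
  | x :: rest =>
    match prev with
    | some pv =>
      if pv > x then
        if cnt + 1 > 1 then false
        else
          pvAltGo (some pv)
            (some (match pp with
                   | some q => if q > x then pv else x
                   | none => x))
            (cnt + 1) rest
      else pvAltGo (some pv) (some x) cnt rest
    | none => pvAltGo prev (some x) cnt rest

def checkPossibility1_alt (A : List Int) : Bool :=
  pvAltGo none none 0 A

-- ===== PRECONDITION & SPEC =====
def Spec_checkPossibility1 (A : List Int) (out : Bool) : Prop := out = checkPossibility1_alt A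
instance (A : List Int) (out : Bool) : Decidable (Spec_checkPossibility1 A out) := by unfold Spec_checkPossibility1; infer_instance

-- ===== CLAIM (what is proved, stated in full; the proofs are below) =====
def Claim_equal_checkPossibility1 : Prop := ∀ (A : List Int), Dom_checkPossibility1 A → Spec_checkPossibility1 A (checkPossibility1 A)

-- ===== LEMMAS AND PROOFS =====

-- proof-side helpers: a list-structural view of A's indexed loop
def pvChain : Int → List Int → Bool
  | _, [] => true
  | p, x :: xs => if p > x then false else pvChain x xs

def pvScan : Option (Option Int) → Int → Int → List Int → Option (Option Int)
  | st, _, _, [] => st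
  | st, i, v, x :: xs =>
    pvScan (if v > x then (match st with | some none => some (some i) | _ => none) else st)
      (i + 1) x xs

def pvPost (A : List Int) : Option (Option Int) → Bool
  | none => false
  | some none => true
  | some (some p) =>
    decide (p = 0) || decide (p = (A.length : Int) - 2) ||
      decide ((PySem.List.pyGet? A (p - 1)).getD 0 ≤ (PySem.List.pyGet? A (p + 1)).getD 0) ||
      decide ((PySem.List.pyGet? A p).getD 0 ≤ (PySem.List.pyGet? A (p + 2)).getD 0)

lemma pvScan_cons (st : Option (Option Int)) (i v x : Int) (xs : List Int) :
    pvScan st i v (x :: xs)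
      = pvScan (if v > x then (match st with | some none => some (some i) | _ => none) else st)
          (i + 1) x xs := rfl

-- the A port is pvPost of its loop's fold (the lets unfold definitionally)
lemma pvA_eq (A : List Int) :
    checkPossibility1 A
      = pvPost A ((PySem.List.pyRange 0 ((A.length : Int) - 1) 1).foldl
          (fun (st : Option (Option Int)) i =>
            match st with
            | none => none
            | some p =>
              if (PySem.List.pyGet? A i).getD 0 > (PySem.List.pyGet? A (i + 1)).getD 0 then
                match p with
                | some _ => none
                | none => some (some i)
              else some p)
          (some none)) := rfl

-- reading A = l ++ r at index l.length + k is reading r at k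
lemma pvGetA (l r : List Int) (k : Nat) (d : Int) :
    (PySem.List.pyGet? (l ++ r) ((l.length : Int) + (k : Int))).getD d = r.getD k d := by
  have h : ((l.length : Int) + (k : Int)) = ((l.length + k : Nat) : Int) := by push_cast; ring
  rw [h]
  simp [pysem, List.getD]

-- A's indexed fold over pyRange equals the structural scan pvScan
lemma pvScan_bridge (A : List Int) :
    ∀ (xs pre : List Int) (v : Int) (st : Option (Option Int)), A = pre ++ v :: xs →
    (PySem.List.pyRange (pre.length : Int) ((A.length : Int) - 1) 1).foldl
      (fun (st : Option (Option Int)) i =>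
        match st with
        | none => none
        | some p =>
          if (PySem.List.pyGet? A i).getD 0 > (PySem.List.pyGet? A (i + 1)).getD 0 then
            match p with
            | some _ => none
            | none => some (some i)
          else some p)
      st = pvScan st (pre.length : Int) v xs := by
  intro xs
  induction xs with
  | nil =>
    intro pre v st h
    have hlen : ((A.length : Int) - 1) ≤ (pre.length : Int) := by
      subst h; simp only [List.length_append, List.length_cons, List.length_nil]
      push_cast; omega
    rw [PySem.List.pyRange_one_eq_nil hlen]
    rfl
  | cons x xs ih =>
    intro pre v st h
    have hlen : (pre.length : Int) < (A.length : Int) - 1 := by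
      subst h; simp only [List.length_append, List.length_cons]
      push_cast; omega
    rw [PySem.List.pyRange_one_cons hlen, List.foldl_cons]
    have hv : (PySem.List.pyGet? A ((pre.length : Int))).getD 0 = v := by
      have := pvGetA pre (v :: x :: xs) 0 0
      rw [h]; simp only [Int.natCast_zero, add_zero] at this; exact this
    have hx : (PySem.List.pyGet? A ((pre.length : Int) + 1)).getD 0 = x := by
      have := pvGetA pre (v :: x :: xs) 1 0
      rw [h]; simpa using this
    have h' : A = (pre ++ [v]) ++ x :: xs := by simp [h]
    have hcast : (((pre ++ [v]).length : Nat) : Int) = (pre.length : Int) + 1 := by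
      simp
    rw [pvScan_cons]
    have hstep := ih (pre ++ [v]) x
      (if v > x then (match st with | some none => some (some (pre.length : Int)) | _ => none)
       else st) h'
    rw [hcast] at hstep
    rw [← hstep]
    congr 1
    simp only [hv, hx]
    rcases st with _ | (_ | p) <;> split_ifs <;> rfl

-- once a second descent is seen the scan state is absorbed into `none`
lemma pvScan_none : ∀ (xs : List Int) (i v : Int), pvScan none i v xs = none := by
  intro xs
  induction xs with
  | nil => intro i v; rfl
  | cons x xs ih => intro i v; simp only [pvScan]; split_ifs <;> exact ih _ _

-- after the first descent is recorded, the scan only checks the tail is non-decreasing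
lemma pvScan_some : ∀ (xs : List Int) (i v p : Int),
    pvScan (some (some p)) i v xs = if pvChain v xs then some (some p) else none := by
  intro xs
  induction xs with
  | nil => intro i v p; rfl
  | cons x xs ih =>
    intro i v p
    by_cases hvx : v > x
    · simp [pvScan, pvChain, hvx, pvScan_none]
    · simp [pvScan, pvChain, hvx, ih]

-- after its single fix, B's loop is exactly the non-decreasing check pvChain
lemma pvAltGo_one : ∀ (xs : List Int) (pp : Option Int) (pv : Int),
    pvAltGo pp (some pv) 1 xs = pvChain pv xs := by
  intro xs
  induction xs with
  | nil => intro pp pv; rfl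
  | cons x xs ih =>
    intro pp pv
    by_cases hvx : pv > x
    · simp [pvAltGo, pvChain, hvx]
    · simp [pvAltGo, pvChain, hvx, ih]

-- the heart of the equivalence: A's scan-plus-final-formula equals B's greedy repair
lemma pvMain : ∀ (xs pre : List Int) (v : Int),
    pvPost (pre ++ v :: xs) (pvScan (some none) (pre.length : Int) v xs)
      = pvAltGo pre.getLast? (some v) 0 xs := by
  intro xs
  induction xs with
  | nil => intro pre v; rfl
  | cons x xs ih =>
    intro pre v
    by_cases hvx : v > x
    · -- first descent found here
      have hscan : pvScan (some none) (pre.length : Int) v (x :: xs)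
          = pvScan (some (some (pre.length : Int))) ((pre.length : Int) + 1) x xs := by
        rw [pvScan_cons]; simp [hvx]
      have hrhs : pvAltGo pre.getLast? (some v) 0 (x :: xs)
          = pvChain (match pre.getLast? with
                     | some q => if q > x then v else x
                     | none => x) xs := by
        simp only [pvAltGo, if_pos hvx, show ¬((0 : Int) + 1 > 1) by omega, ite_false]
        rcases pre.getLast? with _ | q <;> simp [pvAltGo_one]
      rw [hscan, pvScan_some, hrhs]
      rcases List.eq_nil_or_concat pre with rfl | ⟨l, q, rfl⟩
      · -- descent at index 0: always fixable by lowering prev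
        cases hc : pvChain x xs <;> simp [pvPost, hc]
      · simp only [List.concat_eq_append, List.getLast?_concat]
        rcases xs with _ | ⟨y, rs⟩
        · -- descent at the last pair: always fixable (the p = n-2 disjunct fires)
          simp [pvPost, pvChain]
          left; left; right
          omega
        · -- interior descent: the final formula reduces to (q ≤ x) ∨ (v ≤ y)
          have hA : (l ++ [q]) ++ v :: x :: y :: rs = l ++ q :: v :: x :: y :: rs := by simp
          have hq2 : (PySem.List.pyGet? (l ++ q :: v :: x :: y :: rs)
              ((l.length : Int))).getD 0 = q := by
            have h1 : ((l.length : Int)) = ((l.length : Int) + ((0 : Nat) : Int)) := by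
              push_cast; ring
            rw [h1, pvGetA]; rfl
          have hv2 : (PySem.List.pyGet? (l ++ q :: v :: x :: y :: rs)
              ((l.length : Int) + 1)).getD 0 = v := by
            have h1 : ((l.length : Int) + 1) = ((l.length : Int) + ((1 : Nat) : Int)) := by
              push_cast; ring
            rw [h1, pvGetA]; rfl
          have hx2 : (PySem.List.pyGet? (l ++ q :: v :: x :: y :: rs)
              ((l.length : Int) + 1 + 1)).getD 0 = x := by
            have h1 : ((l.length : Int) + 1 + 1) = ((l.length : Int) + ((2 : Nat) : Int)) := by
              push_cast; ring
            rw [h1, pvGetA]; rfl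
          have hy2 : (PySem.List.pyGet? (l ++ q :: v :: x :: y :: rs)
              ((l.length : Int) + 1 + 2)).getD 0 = y := by
            have h1 : ((l.length : Int) + 1 + 2) = ((l.length : Int) + ((3 : Nat) : Int)) := by
              push_cast; ring
            rw [h1, pvGetA]; rfl
          rw [hA]
          by_cases hqx : q > x
          · -- fix by raising x to v: the tail must be chained from v
            by_cases hvy : v > y
            · cases hc : pvChain x (y :: rs) <;>
                simp [pvPost, pvChain, hv2, hx2, hy2,
                  show x < q by omega, show y < v by omega,
                  show ¬((l.length : Int) + 1 = 0) by omega,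
                  show ¬((l.length : Int) + 1
                    = (l.length : Int) + ((rs.length : Int) + 1 + 1 + 1 + 1) - 2) by omega]
            · cases hc : pvChain y rs <;>
                simp [pvPost, pvChain, hc, hv2, hx2, hy2,
                  show x < q by omega, show ¬(y < v) by omega, show ¬(y < x) by omega,
                  show v ≤ y by omega, show ¬(q ≤ x) by omega,
                  show ¬((l.length : Int) + 1 = 0) by omega,
                  show ¬((l.length : Int) + 1
                    = (l.length : Int) + ((rs.length : Int) + 1 + 1 + 1 + 1) - 2) by omega]
          · -- fix by lowering prev to x: the tail must be chained from x
            have hqx' : q ≤ x := by omega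
            cases hc : pvChain x (y :: rs) with
            | true =>
              simp [pvPost, pvChain, hv2, hx2, hy2, hqx', show ¬(x < q) by omega,
                show ¬((l.length : Int) + 1 = 0) by omega,
                show ¬((l.length : Int) + 1
                  = (l.length : Int) + ((rs.length : Int) + 1 + 1 + 1 + 1) - 2) by omega]
              simp [pvChain] at hc
              exact ⟨by omega, hc.2⟩
            | false =>
              simp [pvPost, pvChain, show ¬(x < q) by omega]
              simp [pvChain] at hc
              exact hc
    · -- no descent yet: both sides step forward in lockstep
      have hcast : (((pre ++ [v]).length : Nat) : Int) = (pre.length : Int) + 1 := by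
        simp
      have h' : pre ++ v :: x :: xs = (pre ++ [v]) ++ x :: xs := by simp
      rw [pvScan_cons, if_neg hvx, h']
      have hih := ih (pre ++ [v]) x
      rw [hcast, List.getLast?_concat] at hih
      rw [hih]
      simp [pvAltGo, hvx]

-- ===== VERDICT (by name: the statement is the Claim_ definition above) =====
theorem checkPossibility1_spec : Claim_equal_checkPossibility1 := by
  intro A _
  unfold Spec_checkPossibility1
  rcases A with _ | ⟨v, xs⟩
  · rfl
  · have hb := pvScan_bridge (v :: xs) xs [] v (some none) rfl
    simp only [List.length_nil, Int.natCast_zero] at hb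
    rw [pvA_eq, hb]
    have hm := pvMain xs [] v
    simp only [List.length_nil, Int.natCast_zero, List.nil_append, List.getLast?_nil] at hm
    rw [hm]
    rfl
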